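-- pv_equiv track=rewrite | github.com/tomqwu/aml_open_framework | src/aml_framework/typology_library.py | _pick_fallback_queue
-- ===== SOURCE A (Python) =====
-- def _pick_fallback_queue(severity: str, queues: list[str]) -> str | None:
--     """Choose a sensible escalate_to when the typology's preferred id is missing.
--
--     Strategy:
--       - high/critical severity → prefer queue matching `l2*` or
--         containing 'investigator'
--       - low/medium severity → prefer queue matching `l1*` or
--         containing 'analyst'
--       - fall back to the first queue id in the spec
--     """
--     if not queues:
--         return None
--     sev = severity.lower()
--     high_pri = sev in {"high", "critical"}
--
--     def _match(predicate) -> str | None: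
--         for q in queues:
--             if predicate(q):
--                 return q
--         return None
--
--     if high_pri:
--         candidate = _match(lambda q: q.startswith("l2")) or _match(lambda q: "investigator" in q)
--     else:
--         candidate = _match(lambda q: q.startswith("l1")) or _match(lambda q: "analyst" in q)
--     return candidate or queues[0]
-- ===== SOURCE B (Python) =====
-- def _pick_fallback_queue(severity, queues):
--     """Single pass: record the first prefix match and the first keyword match at once."""
--     if not queues:
--         return None
--     if severity.lower() in ("high", "critical"):
--         prefix, keyword = "l2", "investigator"
--     else:
--         prefix, keyword = "l1", "analyst"
--     primary = secondary = None
--     for q in queues: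
--         if primary is None and q.startswith(prefix):
--             primary = q
--         if secondary is None and keyword in q:
--             secondary = q
--     if primary is not None:
--         return primary
--     if secondary is not None:
--         return secondary
--     return queues[0]
-- ===== Notes on version B (the rewrite author's own statement) =====
-- stated objective: alternative
-- what changed: Replaces A's two sequential _match scans (prefix scan, then substring scan) with one pass over the queues that records the first prefix match and the first keyword match simultaneously, then picks primary, secondary, or queues[0].
import Mathlib
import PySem

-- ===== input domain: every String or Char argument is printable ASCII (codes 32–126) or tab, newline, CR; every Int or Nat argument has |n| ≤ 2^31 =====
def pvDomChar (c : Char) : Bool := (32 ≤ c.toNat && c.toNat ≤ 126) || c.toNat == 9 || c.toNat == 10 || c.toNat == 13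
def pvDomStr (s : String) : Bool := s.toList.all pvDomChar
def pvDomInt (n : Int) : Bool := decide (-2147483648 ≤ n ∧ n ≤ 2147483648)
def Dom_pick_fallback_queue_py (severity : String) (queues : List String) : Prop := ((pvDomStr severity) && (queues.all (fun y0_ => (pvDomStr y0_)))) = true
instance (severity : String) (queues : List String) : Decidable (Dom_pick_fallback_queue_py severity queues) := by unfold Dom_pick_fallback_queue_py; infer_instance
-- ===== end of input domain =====

-- B replaces A's two sequential scans with one pass recording both candidate kinds at once (alternative decomposition, same cost).

-- ===== PORT A =====
-- Python `x or y` on str|None values (None and "" are falsy).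
def pvPyOrStr (a b : Option String) : Option String :=
  match a with
  | some s => if s == "" then b else some s
  | none => b

def pick_fallback_queue_py (severity : String) (queues : List String) : Option String :=
  if queues.isEmpty then none
  else
    let sev := PySem.Str.lower severity
    let high_pri := sev == "high" || sev == "critical"
    let candidate :=
      if high_pri then
        pvPyOrStr (queues.find? (fun q => PySem.Str.startswith q "l2"))
                  (queues.find? (fun q => PySem.Str.isIn "investigator" q))
      else
        pvPyOrStr (queues.find? (fun q => PySem.Str.startswith q "l1"))
                  (queues.find? (fun q => PySem.Str.isIn "analyst" q))
    pvPyOrStr candidate queues.head?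

-- ===== PORT B =====
-- one step of B's single pass: set each slot only if still unset
def pvScanStep (pre sub : String) (acc : Option String × Option String) (q : String) :
    Option String × Option String :=
  ((if acc.1.isNone && PySem.Str.startswith q pre then some q else acc.1),
   (if acc.2.isNone && PySem.Str.isIn sub q then some q else acc.2))

def pick_fallback_queue_py_alt (severity : String) (queues : List String) : Option String :=
  if queues.isEmpty then none
  else
    let sev := PySem.Str.lower severity
    let pk := if sev == "high" || sev == "critical" then ("l2", "investigator") else ("l1", "analyst")
    let r := queues.foldl (pvScanStep pk.1 pk.2) (none, none)
    match r.1 with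
    | some s => some s
    | none =>
      match r.2 with
      | some s => some s
      | none => queues.head?

-- ===== PRECONDITION & SPEC =====
def Spec_pick_fallback_queue_py (severity : String) (queues : List String) (out : Option String) : Prop := out = pick_fallback_queue_py_alt severity queues
instance (severity : String) (queues : List String) (out : Option String) : Decidable (Spec_pick_fallback_queue_py severity queues out) := by unfold Spec_pick_fallback_queue_py; infer_instance

-- ===== CLAIM (what is proved, stated in full; the proofs are below) =====
def Claim_equal_pick_fallback_queue_py : Prop := ∀ (severity : String) (queues : List String), Dom_pick_fallback_queue_py severity queues → Spec_pick_fallback_queue_py severity queues (pick_fallback_queue_py severity queues)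

-- ===== LEMMAS AND PROOFS =====

-- B's single pass computes exactly the two first-match searches of A.
theorem scan_eq (pre sub : String) : ∀ (qs : List String) (a b : Option String),
    qs.foldl (pvScanStep pre sub) (a, b)
      = (a.or (qs.find? (fun q => PySem.Str.startswith q pre)),
         b.or (qs.find? (fun q => PySem.Str.isIn sub q))) := by
  intro qs
  induction qs with
  | nil => intro a b; simp
  | cons q rest ih =>
    intro a b
    simp only [List.foldl_cons, List.find?_cons, pvScanStep]
    rw [ih]
    cases a <;> cases b <;>
      cases hp : PySem.Str.startswith q pre <;>
      cases hq : PySem.Str.isIn sub q <;>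
      simp_all [Option.or]

theorem startswith_some_ne_empty {qs : List String} {pre s : String}
    (h : qs.find? (fun q => PySem.Str.startswith q pre) = some s) (hpre : pre ≠ "") :
    s ≠ "" := by
  have hp := List.find?_some h
  intro hs
  subst hs
  rw [PySem.Str.startswith_eq, PySem.Chars.startswith_iff] at hp
  simp only [String.toList_empty, List.prefix_nil] at hp
  exact hpre (String.toList_eq_nil_iff.mp hp)

theorem isIn_some_ne_empty {qs : List String} {sub s : String}
    (h : qs.find? (fun q => PySem.Str.isIn sub q) = some s) (hsub : sub ≠ "") :
    s ≠ "" := by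
  have hp := List.find?_some h
  intro hs
  subst hs
  rw [PySem.Str.isIn_eq, PySem.Chars.isIn_iff_infix] at hp
  simp only [String.toList_empty, List.infix_nil] at hp
  exact hsub (String.toList_eq_nil_iff.mp hp)

-- the two severity branches are proved by one helper
theorem branch_eq (queues : List String) (pre sub : String)
    (hpre : pre ≠ "") (hsub : sub ≠ "") :
    pvPyOrStr (pvPyOrStr (queues.find? (fun q => PySem.Str.startswith q pre))
                         (queues.find? (fun q => PySem.Str.isIn sub q)))
              queues.head?
      = (match (queues.foldl (pvScanStep pre sub) (none, none)).1 with
         | some s => some s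
         | none =>
           match (queues.foldl (pvScanStep pre sub) (none, none)).2 with
           | some s => some s
           | none => queues.head?) := by
  rw [scan_eq]
  simp only [Option.or]
  cases h1 : queues.find? (fun q => PySem.Str.startswith q pre) with
  | some s =>
    have := startswith_some_ne_empty h1 hpre
    simp [pvPyOrStr, this]
  | none =>
    cases h2 : queues.find? (fun q => PySem.Str.isIn sub q) with
    | some s =>
      have := isIn_some_ne_empty h2 hsub
      simp [pvPyOrStr, this]
    | none => simp [pvPyOrStr]

-- ===== VERDICT (by name: the statement is the Claim_ definition above) =====
theorem pick_fallback_queue_py_spec : Claim_equal_pick_fallback_queue_py := by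
  intro severity queues _
  unfold Spec_pick_fallback_queue_py pick_fallback_queue_py pick_fallback_queue_py_alt
  cases queues with
  | nil => rfl
  | cons q0 rest =>
    simp only [List.isEmpty_cons, if_neg (by simp : ¬ (false = true))]
    by_cases h : (PySem.Str.lower severity == "high" || PySem.Str.lower severity == "critical") = true <;>
      simp only [h, if_pos, if_neg, Bool.false_eq_true, not_false_iff] <;>
      exact branch_eq (q0 :: rest) _ _ (by decide) (by decide)
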